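-- pv_equiv track=rewrite | github.com/NeroNL/algorithm | src/main/java/Airbnb/MissingWords.py | find_missing_words
-- ===== SOURCE A (Python) =====
-- def find_missing_words(s, t):
--     a = s.split(" ")
--     b = t.split(" ")
--     c = []
--
--     i = 0
--
--     for w in b:
--         while i < len(a):
--             if w == a[i]:
--                 break
--             else:
--                 c.append(a[i])
--             i += 1
--         i += 1
--
--     while i < len(a):
--         c.append(a[i])
--         i += 1
--
--     return c
-- ===== SOURCE B (Python) =====
-- def find_missing_words(s, t):
--     a = s.split(" ")
--     b = t.split(" ")
--     res = []
--     j = 0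
--     for w in a:
--         if j < len(b) and w == b[j]:
--             j += 1
--         else:
--             res.append(w)
--     return res
-- ===== Notes on version B (the rewrite author's own statement) =====
-- stated objective: simpler
-- what changed: A drives an outer loop over t's words with a nested while-scan over s's words plus a trailing flush loop; B is one flat pass over s's words with a single pointer into t's words, no nesting and no flush.
import Mathlib
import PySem

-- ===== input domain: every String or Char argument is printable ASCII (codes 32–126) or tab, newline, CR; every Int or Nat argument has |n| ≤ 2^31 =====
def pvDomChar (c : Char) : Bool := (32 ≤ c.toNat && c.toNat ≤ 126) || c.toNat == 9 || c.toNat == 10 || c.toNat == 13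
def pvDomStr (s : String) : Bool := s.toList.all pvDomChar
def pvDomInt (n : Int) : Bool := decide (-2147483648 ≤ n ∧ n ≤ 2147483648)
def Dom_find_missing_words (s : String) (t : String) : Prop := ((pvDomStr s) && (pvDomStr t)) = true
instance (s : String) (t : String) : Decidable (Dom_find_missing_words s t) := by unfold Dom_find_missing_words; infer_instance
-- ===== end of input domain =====

-- B replaces A's outer loop over t's words (with a nested while-scan over s's words and a
-- trailing flush loop) by one flat pass over s's words with a single pointer into t's words.

-- ===== PORT A =====
-- inner 'while i < len(a): if w == a[i]: break else: c.append(a[i]); i += 1' followed by the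
-- for-body's 'i += 1' (applied both on break and on exhaustion, exactly as in the Python)
def pvInnerA (a : List String) (w : String) (i : Nat) (c : List String) : Nat × List String :=
  if h : i < a.length then
    if w = a[i] then (i + 1, c)
    else pvInnerA a w (i + 1) (c ++ [a[i]])
  else (i + 1, c)
termination_by a.length - i

-- trailing 'while i < len(a): c.append(a[i]); i += 1'
def pvFlushA (a : List String) (i : Nat) (c : List String) : List String :=
  if h : i < a.length then pvFlushA a (i + 1) (c ++ [a[i]]) else c
termination_by a.length - i

-- 'for w in b: …' carrying the shared (i, c) state, then the flush
def pvOuterA (a : List String) : List String → Nat → List String → List String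
  | [], i, c => pvFlushA a i c
  | w :: bs, i, c =>
      let p := pvInnerA a w i c
      pvOuterA a bs p.1 p.2

def find_missing_words (s : String) (t : String) : List String :=
  let a := (PySem.Str.split? s " ").getD []   -- sep " " ≠ "": split? is always some
  let b := (PySem.Str.split? t " ").getD []
  pvOuterA a b 0 []

-- ===== PORT B =====
-- 'for w in a: if j < len(b) and w == b[j]: j += 1 else: res.append(w)'
def pvLoopB (b : List String) : List String → Nat → List String → List String
  | [], _, res => res
  | w :: as, j, res =>
      if h : j < b.length then
        if w = b[j] then pvLoopB b as (j + 1) res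
        else pvLoopB b as j (res ++ [w])
      else pvLoopB b as j (res ++ [w])

def find_missing_words_alt (s : String) (t : String) : List String :=
  let a := (PySem.Str.split? s " ").getD []
  let b := (PySem.Str.split? t " ").getD []
  pvLoopB b a 0 []

-- ===== PRECONDITION & SPEC =====
def Spec_find_missing_words (s : String) (t : String) (out : List String) : Prop := out = find_missing_words_alt s t
instance (s : String) (t : String) (out : List String) : Decidable (Spec_find_missing_words s t out) := by unfold Spec_find_missing_words; infer_instance

-- ===== CLAIM (what is proved, stated in full; the proofs are below) =====
def Claim_equal_find_missing_words : Prop := ∀ (s : String) (t : String), Dom_find_missing_words s t → Spec_find_missing_words s t (find_missing_words s t)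

-- ===== LEMMAS AND PROOFS =====

-- common abstraction: greedily match the word list bs against as, collecting unmatched words of as
def pvMerge : List String → List String → List String → List String
  | [], as, c => c ++ as
  | _ :: _, [], c => c
  | w :: bs, x :: as, c => if w = x then pvMerge bs as c else pvMerge (w :: bs) as (c ++ [x])

theorem pvMerge_nil_right (bs c : List String) : pvMerge bs [] c = c := by
  cases bs <;> simp [pvMerge]

theorem pvFlushA_eq (a : List String) (i : Nat) (c : List String) :
    pvFlushA a i c = c ++ a.drop i := by
  unfold pvFlushA
  split
  · next h =>
    rw [pvFlushA_eq, List.drop_eq_getElem_cons h]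
    simp
  · next h =>
    rw [List.drop_eq_nil_of_le (by omega)]
    simp
termination_by a.length - i

theorem pvInnerA_eq (a : List String) (w : String) (i : Nat) (c bs : List String) :
    pvMerge bs (a.drop (pvInnerA a w i c).1) (pvInnerA a w i c).2
      = pvMerge (w :: bs) (a.drop i) c := by
  unfold pvInnerA
  split
  · next h =>
    rw [List.drop_eq_getElem_cons h]
    split
    · next hw => simp [pvMerge, hw]
    · next hw =>
      rw [pvInnerA_eq]
      simp [pvMerge, hw]
  · next h =>
    rw [List.drop_eq_nil_of_le (by omega), List.drop_eq_nil_of_le (by omega)]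
    rw [pvMerge_nil_right, pvMerge_nil_right]
termination_by a.length - i

theorem pvOuterA_eq (a : List String) (B : List String) :
    ∀ (i : Nat) (c : List String), pvOuterA a B i c = pvMerge B (a.drop i) c := by
  induction B with
  | nil => intro i c; simp [pvOuterA, pvFlushA_eq, pvMerge]
  | cons w bs ih =>
    intro i c
    simp only [pvOuterA]
    rw [ih, pvInnerA_eq]

theorem pvLoopB_eq (b : List String) (as : List String) :
    ∀ (j : Nat) (res : List String), pvLoopB b as j res = pvMerge (b.drop j) as res := by
  induction as with
  | nil => intro j res; simp [pvLoopB, pvMerge_nil_right]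
  | cons x as ih =>
    intro j res
    unfold pvLoopB
    split
    · next h =>
      rw [List.drop_eq_getElem_cons h]
      split
      · next hw =>
        rw [ih]
        simp only [pvMerge]
        rw [if_pos hw.symm]
      · next hw =>
        have hne : ¬ b[j] = x := fun he => hw he.symm
        rw [ih, List.drop_eq_getElem_cons h]
        simp only [pvMerge]
        rw [if_neg hne]
    · next h =>
      rw [ih, List.drop_eq_nil_of_le (show b.length ≤ j by omega)]
      simp [pvMerge]

-- ===== VERDICT (by name: the statement is the Claim_ definition above) =====
theorem find_missing_words_spec : Claim_equal_find_missing_words := by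
  intro s t _
  show find_missing_words s t = find_missing_words_alt s t
  unfold find_missing_words find_missing_words_alt
  rw [pvOuterA_eq, pvLoopB_eq, List.drop_zero, List.drop_zero]
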